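-- pv_equiv track=rewrite | github.com/CGI-NRM/NGSGenotype | Genotyped_SNPs/ultimate_locus_parser.py | recurring_csv
-- ===== SOURCE A (Python) =====
-- def recurring_csv(gt_dict, print_order_list, out_string):
--     if out_string != 'EMPTY':
--         out_string = out_string + ',' + gt_dict[print_order_list.pop(0)]
--     else:
--         out_string = gt_dict[print_order_list.pop(0)]
--     if len(print_order_list) == 0:
--         return out_string
--     else:
--         return recurring_csv(gt_dict, print_order_list, out_string)
-- ===== SOURCE B (Python) =====
-- def recurring_csv(gt_dict, print_order_list, out_string):
--     joined = ','.join(gt_dict[k] for k in print_order_list)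
--     print_order_list.clear()
--     if out_string == 'EMPTY':
--         return joined
--     return out_string + ',' + joined
-- ===== Notes on version B (the rewrite author's own statement) =====
-- stated objective: idiomatic
-- what changed: Replaces the tail recursion that pops and concatenates one key at a time with a single ','.join over the looked-up values followed by one branch on the initial accumulator.
-- intended difference: When out_string is 'EMPTY', the list has at least two keys and the first key's value is the string 'EMPTY', A's accumulator collides with its sentinel and A silently drops that leading 'EMPTY' value (e.g. returns 'x'), while B keeps it ('EMPTY,x'), which is the intended CSV of all requested values. — e.g. on recurring_csv([("a", "EMPTY"), ("b", "x")], ["a", "b"], "EMPTY"): A returns "x", B returns "EMPTY,x"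
import Mathlib
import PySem

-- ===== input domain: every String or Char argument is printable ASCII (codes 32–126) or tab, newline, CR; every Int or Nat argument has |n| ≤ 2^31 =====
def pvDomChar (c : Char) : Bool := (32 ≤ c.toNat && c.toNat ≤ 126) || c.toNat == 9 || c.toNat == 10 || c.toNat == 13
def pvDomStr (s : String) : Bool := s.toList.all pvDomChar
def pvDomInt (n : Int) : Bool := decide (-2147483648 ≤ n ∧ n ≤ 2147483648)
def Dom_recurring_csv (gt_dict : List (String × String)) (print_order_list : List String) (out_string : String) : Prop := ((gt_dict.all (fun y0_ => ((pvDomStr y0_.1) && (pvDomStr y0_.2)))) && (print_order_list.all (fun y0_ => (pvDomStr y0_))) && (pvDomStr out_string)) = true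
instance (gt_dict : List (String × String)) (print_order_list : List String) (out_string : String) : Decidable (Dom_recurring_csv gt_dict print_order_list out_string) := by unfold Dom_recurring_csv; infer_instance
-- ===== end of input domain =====

-- B builds the row with ','.join over the looked-up values instead of A's pop-one-key tail
-- recursion; equivalence is about the RETURN value only (A empties print_order_list in place;
-- B clears it too).


-- ===== PORT A =====
-- gt_dict[k] is (gt_dict.lookup k).getD "" — exact under Pre_ (key present; Python raises KeyError otherwise);
-- print_order_list.pop(0) on the empty list raises IndexError, excluded by Pre_ (the [] branch is unreachable there).
def recurring_csv (gt_dict : List (String × String)) (print_order_list : List String) (out_string : String) : String :=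
  match print_order_list with
  | [] => out_string
  | k :: rest =>
    let out' := if out_string ≠ "EMPTY"
                then out_string ++ "," ++ ((gt_dict.lookup k).getD "")
                else (gt_dict.lookup k).getD ""
    if rest.length = 0 then out' else recurring_csv gt_dict rest out'

-- ===== PORT B =====
def recurring_csv_alt (gt_dict : List (String × String)) (print_order_list : List String) (out_string : String) : String :=
  let joined := PySem.Str.join "," (print_order_list.map (fun k => (gt_dict.lookup k).getD ""))
  if out_string = "EMPTY" then joined else out_string ++ "," ++ joined

-- ===== PRECONDITION & SPEC =====
-- Pre_ excludes exactly the inputs where A raises: an empty print_order_list (IndexError from pop(0))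
-- and a requested key missing from gt_dict (KeyError).
def Pre_recurring_csv (gt_dict : List (String × String)) (print_order_list : List String) (out_string : String) : Prop :=
  print_order_list ≠ [] ∧ ∀ k ∈ print_order_list, (gt_dict.lookup k).isSome = true
instance (gt_dict : List (String × String)) (print_order_list : List String) (out_string : String) : Decidable (Pre_recurring_csv gt_dict print_order_list out_string) := by unfold Pre_recurring_csv; infer_instance

def pvWitness_recurring_csv : (List (String × String)) × List String × String :=
  ([("a", "1"), ("b", "2")], ["a", "b"], "EMPTY")

-- When out_string is "EMPTY", the list has ≥ 2 keys and the first key's value is "EMPTY", A's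
-- accumulator collides with its sentinel and A silently drops that leading "EMPTY" value, while
-- B keeps it, which is the intended CSV of all requested values.
def D_recurring_csv (gt_dict : List (String × String)) (print_order_list : List String) (out_string : String) : Prop :=
  out_string = "EMPTY" ∧ 2 ≤ print_order_list.length ∧
    (gt_dict.lookup print_order_list.headI).getD "" = "EMPTY"
instance (gt_dict : List (String × String)) (print_order_list : List String) (out_string : String) : Decidable (D_recurring_csv gt_dict print_order_list out_string) := by unfold D_recurring_csv; infer_instance

def Spec_recurring_csv (gt_dict : List (String × String)) (print_order_list : List String) (out_string : String) (out : String) : Prop := ¬ D_recurring_csv gt_dict print_order_list out_string → out = recurring_csv_alt gt_dict print_order_list out_string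
instance (gt_dict : List (String × String)) (print_order_list : List String) (out_string : String) (out : String) : Decidable (Spec_recurring_csv gt_dict print_order_list out_string out) := by unfold Spec_recurring_csv; infer_instance

def pvDiffWitness_recurring_csv : (List (String × String)) × List String × String :=
  ([("a", "EMPTY"), ("b", "x")], ["a", "b"], "EMPTY")
def pvDiffWitnessOut_recurring_csv : String × String := ("x", "EMPTY,x")

-- ===== CLAIM (what is proved, stated in full; the proofs are below) =====
def Claim_unchanged_recurring_csv : Prop := ∀ (gt_dict : List (String × String)) (print_order_list : List String) (out_string : String), Dom_recurring_csv gt_dict print_order_list out_string → Pre_recurring_csv gt_dict print_order_list out_string → Spec_recurring_csv gt_dict print_order_list out_string (recurring_csv gt_dict print_order_list out_string)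
def Claim_changed_recurring_csv : Prop := Dom_recurring_csv (pvDiffWitness_recurring_csv.1) (pvDiffWitness_recurring_csv.2.1) (pvDiffWitness_recurring_csv.2.2) ∧ Pre_recurring_csv (pvDiffWitness_recurring_csv.1) (pvDiffWitness_recurring_csv.2.1) (pvDiffWitness_recurring_csv.2.2) ∧ D_recurring_csv (pvDiffWitness_recurring_csv.1) (pvDiffWitness_recurring_csv.2.1) (pvDiffWitness_recurring_csv.2.2) ∧ recurring_csv (pvDiffWitness_recurring_csv.1) (pvDiffWitness_recurring_csv.2.1) (pvDiffWitness_recurring_csv.2.2) = pvDiffWitnessOut_recurring_csv.1 ∧ recurring_csv_alt (pvDiffWitness_recurring_csv.1) (pvDiffWitness_recurring_csv.2.1) (pvDiffWitness_recurring_csv.2.2) = pvDiffWitnessOut_recurring_csv.2 ∧ pvDiffWitnessOut_recurring_csv.1 ≠ pvDiffWitnessOut_recurring_csv.2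
def Claim_exact_recurring_csv : Prop := ∀ (gt_dict : List (String × String)) (print_order_list : List String) (out_string : String), Dom_recurring_csv gt_dict print_order_list out_string → Pre_recurring_csv gt_dict print_order_list out_string → D_recurring_csv gt_dict print_order_list out_string → recurring_csv gt_dict print_order_list out_string ≠ recurring_csv_alt gt_dict print_order_list out_string

-- ===== LEMMAS AND PROOFS =====

-- the value A and B read for a key
def pvVal (gt_dict : List (String × String)) (k : String) : String := (gt_dict.lookup k).getD ""

def pvJoinVals (gt_dict : List (String × String)) (pol : List String) : String :=
  PySem.Str.join "," (pol.map (fun k => pvVal gt_dict k))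

theorem pvJoin_singleton (gd : List (String × String)) (k : String) :
    pvJoinVals gd [k] = pvVal gd k := by
  simp [pvJoinVals, PySem.Str.join]

theorem pvJoin_cons (gd : List (String × String)) (k k' : String) (rest : List String) :
    pvJoinVals gd (k :: k' :: rest) = pvVal gd k ++ "," ++ pvJoinVals gd (k' :: rest) := by
  unfold pvJoinVals
  rw [← String.toList_inj]
  simp [PySem.Str.toList_join, PySem.Chars.join_cons_cons]

theorem pvComma_ne (a b : String) : a ++ "," ++ b ≠ "EMPTY" := by
  intro h
  rw [← String.toList_inj] at h
  simp at h
  have hm : (',' : Char) ∈ (['E','M','P','T','Y'] : List Char) := by rw [← h]; simp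
  simp at hm

-- A with a non-"EMPTY" accumulator appends all values, comma-separated
theorem pvA_nonempty (gd : List (String × String)) (pol : List String) (acc : String)
    (hpol : pol ≠ []) (hacc : acc ≠ "EMPTY") :
    recurring_csv gd pol acc = acc ++ "," ++ pvJoinVals gd pol := by
  induction pol generalizing acc with
  | nil => exact absurd rfl hpol
  | cons k rest ih =>
    simp only [recurring_csv, if_pos hacc]
    cases rest with
    | nil => simp [pvJoin_singleton, pvVal]
    | cons k' rest' =>
      simp only [List.length_cons, Nat.succ_ne_zero, reduceIte]
      rw [ih _ (List.cons_ne_nil _ _) (pvComma_ne _ _), pvJoin_cons]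
      simp [pvVal, String.append_assoc]

theorem pvA_len_le (gd : List (String × String)) (pol : List String) (hpol : pol ≠ []) :
    (recurring_csv gd pol "EMPTY").length ≤ (pvJoinVals gd pol).length := by
  induction pol with
  | nil => exact absurd rfl hpol
  | cons k rest ih =>
    simp only [recurring_csv, ite_not]
    cases rest with
    | nil => simp [pvJoin_singleton, pvVal]
    | cons k' rest' =>
      simp only [List.length_cons, Nat.succ_ne_zero, reduceIte]
      rw [pvJoin_cons]
      by_cases hv : (gd.lookup k).getD "" = "EMPTY"
      · rw [hv]
        have h1 := ih (List.cons_ne_nil _ _)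
        have h2 : (pvVal gd k ++ "," ++ pvJoinVals gd (k' :: rest')).length
            = (pvVal gd k).length + 1 + (pvJoinVals gd (k' :: rest')).length := by
          simp [String.length_append]
          rfl
        omega
      · rw [pvA_nonempty gd (k' :: rest') ((gd.lookup k).getD "") (List.cons_ne_nil _ _) hv]
        simp [pvVal]

-- ===== VERDICT (by name: the statement is the Claim_ definition above) =====
theorem recurring_csv_spec : Claim_unchanged_recurring_csv := by
  intro gd pol out _ hpre hD
  obtain ⟨hne, -⟩ := hpre
  cases pol with
  | nil => exact absurd rfl hne
  | cons k rest =>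
    show recurring_csv gd (k :: rest) out
      = if out = "EMPTY" then pvJoinVals gd (k :: rest)
        else out ++ "," ++ pvJoinVals gd (k :: rest)
    by_cases hout : out = "EMPTY"
    · subst hout
      simp only []
      simp only [recurring_csv, ite_not]
      cases rest with
      | nil => simp [pvJoin_singleton, pvVal]
      | cons k' rest' =>
        have hv : (gd.lookup k).getD "" ≠ "EMPTY" := by
          intro hv
          exact hD ⟨rfl, by simp, by simpa [pvVal] using hv⟩
        simp only [List.length_cons, Nat.succ_ne_zero, reduceIte]
        rw [pvA_nonempty gd _ _ (List.cons_ne_nil _ _) hv, pvJoin_cons]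
        simp [pvVal]
    · rw [if_neg hout, pvA_nonempty gd _ _ (List.cons_ne_nil _ _) hout]

theorem recurring_csv_changed : Claim_changed_recurring_csv := by
  unfold Claim_changed_recurring_csv
  refine ⟨by decide, ⟨by decide, by decide⟩, by decide, ?_, ?_, by decide⟩
  · simp [pvDiffWitness_recurring_csv, pvDiffWitnessOut_recurring_csv, recurring_csv, List.lookup]
  · show recurring_csv_alt _ _ _ = _
    simp only [pvDiffWitness_recurring_csv, pvDiffWitnessOut_recurring_csv, recurring_csv_alt,
      List.lookup, PySem.Str.join, PySem.Chars.join]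
    rw [← String.toList_inj]
    simp
    decide

theorem recurring_csv_tight : Claim_exact_recurring_csv := by
  intro gd pol out _ hpre hD heq
  obtain ⟨hout, hlen, hval⟩ := hD
  subst hout
  match pol, hlen with
  | k :: k' :: rest, _ =>
    have hv : (gd.lookup k).getD "" = "EMPTY" := by simpa using hval
    have hA : recurring_csv gd (k :: k' :: rest) "EMPTY"
        = recurring_csv gd (k' :: rest) "EMPTY" := by
      simp only [recurring_csv, ite_not, hv]
      simp
    have hB : recurring_csv_alt gd (k :: k' :: rest) "EMPTY"
        = pvVal gd k ++ "," ++ pvJoinVals gd (k' :: rest) := by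
      show pvJoinVals gd (k :: k' :: rest) = _
      exact pvJoin_cons gd k k' rest
    have hle := pvA_len_le gd (k' :: rest) (List.cons_ne_nil _ _)
    rw [hA, hB] at heq
    have hlen2 : (pvVal gd k ++ "," ++ pvJoinVals gd (k' :: rest)).length
        = (pvVal gd k).length + 1 + (pvJoinVals gd (k' :: rest)).length := by
      simp [String.length_append]
      rfl
    have hvlen : (pvVal gd k).length = 5 := by simp [pvVal, hv]; rfl
    have := congrArg String.length heq
    omega
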